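-- pv_equiv track=rewrite | github.com/Rohanranga/resume_ranking_using_TL-IDF-ML | done.py | calculate_proximity_score
-- ===== SOURCE A (Python) =====
-- def calculate_proximity_score(text, keyword):
--     points = 0
--     proximity_keywords = {
--         "intern": 5,
--         "developer": 10,
--         "job": 10,
--         "certificate": 2,
--         "project": 3,
--         "software":10,
--         "applications":10,
--         "python":12,
--         "c++":12,
--         "java":12,
--         "git":8,
--         "api":8,
--         "internship":4,
--
--     }
--
--     words = text.lower().split()
--     keyword = keyword.lower()
--
--     for i, word in enumerate(words):
--         if word == keyword:
--             # Check for proximity of other keywords within 1 or 2 words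
--             for j in range(max(0, i - 2), min(len(words), i + 3)):
--                 if words[j] in proximity_keywords:
--                     points += proximity_keywords[words[j]]
--
--     return points
-- ===== SOURCE B (Python) =====
-- def calculate_proximity_score(text, keyword):
--     proximity_keywords = {
--         "intern": 5,
--         "developer": 10,
--         "job": 10,
--         "certificate": 2,
--         "project": 3,
--         "software": 10,
--         "applications": 10,
--         "python": 12,
--         "c++": 12,
--         "java": 12,
--         "git": 8,
--         "api": 8,
--         "internship": 4,
--     }
--     words = text.lower().split()
--     keyword = keyword.lower()
--     # positions of every occurrence of the keyword (multiplicity preserved)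
--     positions = [i for i, w in enumerate(words) if w == keyword]
--     points = 0
--     for j, word in enumerate(words):
--         weight = proximity_keywords.get(word)
--         if weight is not None:
--             points += weight * sum(1 for i in positions if abs(i - j) <= 2)
--     return points
-- ===== Notes on version B (the rewrite author's own statement) =====
-- stated objective: alternative
-- what changed: Inverts the loop roles: instead of scanning keyword occurrences and summing dictionary weights over each +-2 window, B collects the keyword positions once and then makes a single pass over the words, adding each proximity word's weight multiplied by the number of keyword positions within distance 2.
import Mathlib
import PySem

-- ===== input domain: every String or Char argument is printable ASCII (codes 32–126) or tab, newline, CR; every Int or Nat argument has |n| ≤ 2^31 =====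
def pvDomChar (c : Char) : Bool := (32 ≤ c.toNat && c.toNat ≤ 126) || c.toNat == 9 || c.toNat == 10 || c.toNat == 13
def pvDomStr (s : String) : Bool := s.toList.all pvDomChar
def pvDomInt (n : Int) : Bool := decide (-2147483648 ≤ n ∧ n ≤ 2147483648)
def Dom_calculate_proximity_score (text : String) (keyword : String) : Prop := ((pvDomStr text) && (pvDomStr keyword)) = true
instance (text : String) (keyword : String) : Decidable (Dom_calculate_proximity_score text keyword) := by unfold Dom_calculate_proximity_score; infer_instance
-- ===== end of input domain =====

-- B inverts A's loop roles: it collects the keyword positions once and, in one pass over the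
-- words, adds each proximity word's weight times the number of keyword positions within
-- distance 2 (objective: alternative decomposition; same results, similar cost).

-- shared constant: the proximity_keywords dict literal (identical in Source A and Source B)
def pkDict : PySem.Dict String Int :=
  PySem.Dict.ofList [("intern", 5), ("developer", 10), ("job", 10), ("certificate", 2),
    ("project", 3), ("software", 10), ("applications", 10), ("python", 12),
    ("c++", 12), ("java", 12), ("git", 8), ("api", 8), ("internship", 4)]

-- ===== PORT A =====
def calculate_proximity_score (text : String) (keyword : String) : Int :=
  let words := PySem.Str.split₀ (PySem.Str.lower text)
  let kw := PySem.Str.lower keyword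
  (PySem.List.enumerate words 0).foldl (fun points iw =>
    if iw.2 == kw then
      (PySem.List.pyRange (max 0 (iw.1 - 2)) (min (words.length : Int) (iw.1 + 3)) 1).foldl
        (fun pts j =>
          if pkDict.contains (PySem.List.pyGetD words j "") then
            pts + pkDict.getD (PySem.List.pyGetD words j "") 0
          else pts) points
    else points) 0

-- ===== PORT B =====
def calculate_proximity_score_alt (text : String) (keyword : String) : Int :=
  let words := PySem.Str.split₀ (PySem.Str.lower text)
  let kw := PySem.Str.lower keyword
  let positions : List Int :=
    (PySem.List.enumerate words 0).foldl
      (fun acc iw => if iw.2 == kw then acc ++ [iw.1] else acc) []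
  (PySem.List.enumerate words 0).foldl (fun points jw =>
    match pkDict.get? jw.2 with
    | some w => points + w * (positions.countP (fun i => (i - jw.1).natAbs ≤ 2) : Int)
    | none => points) 0

-- ===== PRECONDITION & SPEC =====
def Spec_calculate_proximity_score (text : String) (keyword : String) (out : Int) : Prop := out = calculate_proximity_score_alt text keyword
instance (text : String) (keyword : String) (out : Int) : Decidable (Spec_calculate_proximity_score text keyword out) := by unfold Spec_calculate_proximity_score; infer_instance

-- ===== CLAIM (what is proved, stated in full; the proofs are below) =====
def Claim_equal_calculate_proximity_score : Prop := ∀ (text : String) (keyword : String), Dom_calculate_proximity_score text keyword → Spec_calculate_proximity_score text keyword (calculate_proximity_score text keyword)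

-- ===== LEMMAS AND PROOFS =====

-- the weight of a word: its dict value, or 0 when absent
def pkW (s : String) : Int := (pkDict.get? s).getD 0

-- sum of a constant under an if = constant * count
theorem sum_if_const {α : Type} (l : List α) (c : α → Prop) [DecidablePred c] (w : Int) :
    (l.map (fun x => if c x then w else 0)).sum = w * (l.countP (fun x => decide (c x)) : Int) := by
  induction l with
  | nil => simp
  | cons a t ih =>
      by_cases h : c a
      · simp [h, ih]; ring
      · simp [h, ih]

-- exchange of a double list sum
theorem sum_sum_comm {α β : Type} (l : List α) (m : List β) (f : α → β → Int) :
    (l.map (fun x => (m.map (fun y => f x y)).sum)).sum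
      = (m.map (fun y => (l.map (fun x => f x y)).sum)).sum := by
  induction l with
  | nil => simp
  | cons a t ih => simp [ih, ← List.sum_map_add]

theorem windowSum (ws : List String) (i : Int) (h0 : 0 ≤ i) (hn : i < (ws.length : Int)) :
    ((PySem.List.pyRange (max 0 (i-2)) (min (ws.length:Int) (i+3)) 1).map
        (fun j => pkW (PySem.List.pyGetD ws j ""))).sum
      = ((PySem.List.enumerate ws 0).map
        (fun jw => if (i - jw.1).natAbs ≤ 2 then pkW jw.2 else 0)).sum := by
  rw [PySem.List.enumerate_eq_map_pyRange ws "", List.map_map]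
  simp only [PySem.List.len_eq, Function.comp_def]
  rw [PySem.List.pyRange_one_append 0 (max 0 (i-2)) (ws.length:Int) (by omega) (by omega),
      PySem.List.pyRange_one_append (max 0 (i-2)) (min (ws.length:Int) (i+3)) (ws.length:Int)
        (by omega) (by omega)]
  simp only [List.map_append, List.sum_append]
  have h1 : ((PySem.List.pyRange 0 (max 0 (i-2)) 1).map
      (fun j => if (i - j).natAbs ≤ 2 then pkW (PySem.List.pyGetD ws j "") else 0)).sum = 0 := by
    apply List.sum_eq_zero
    intro x hx
    obtain ⟨j, hj, rfl⟩ := List.mem_map.mp hx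
    rw [PySem.List.mem_pyRange_one] at hj
    rw [if_neg (by omega)]
  have h3 : ((PySem.List.pyRange (min (ws.length:Int) (i+3)) (ws.length:Int) 1).map
      (fun j => if (i - j).natAbs ≤ 2 then pkW (PySem.List.pyGetD ws j "") else 0)).sum = 0 := by
    apply List.sum_eq_zero
    intro x hx
    obtain ⟨j, hj, rfl⟩ := List.mem_map.mp hx
    rw [PySem.List.mem_pyRange_one] at hj
    rw [if_neg (by omega)]
  have h2 : ((PySem.List.pyRange (max 0 (i-2)) (min (ws.length:Int) (i+3)) 1).map
      (fun j => if (i - j).natAbs ≤ 2 then pkW (PySem.List.pyGetD ws j "") else 0))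
      = ((PySem.List.pyRange (max 0 (i-2)) (min (ws.length:Int) (i+3)) 1).map
      (fun j => pkW (PySem.List.pyGetD ws j ""))) := by
    apply List.map_congr_left
    intro j hj
    rw [PySem.List.mem_pyRange_one] at hj
    rw [if_pos (by omega)]
  rw [h1, h2, h3]
  omega

theorem core (ws : List String) (kw : String) :
    (PySem.List.enumerate ws 0).foldl (fun points iw =>
      if iw.2 == kw then
        (PySem.List.pyRange (max 0 (iw.1 - 2)) (min (ws.length : Int) (iw.1 + 3)) 1).foldl
          (fun pts j =>
            if pkDict.contains (PySem.List.pyGetD ws j "") then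
              pts + pkDict.getD (PySem.List.pyGetD ws j "") 0
            else pts) points
      else points) 0
    = (PySem.List.enumerate ws 0).foldl (fun points jw =>
        match pkDict.get? jw.2 with
        | some w => points + w *
            (((PySem.List.enumerate ws 0).foldl
                (fun acc iw => if iw.2 == kw then acc ++ [iw.1] else acc) ([] : List Int)).countP
              (fun i => (i - jw.1).natAbs ≤ 2) : Int)
        | none => points) 0 := by
  have hstepA : (fun (points : Int) (iw : Int × String) =>
      if iw.2 == kw then
        (PySem.List.pyRange (max 0 (iw.1 - 2)) (min (ws.length : Int) (iw.1 + 3)) 1).foldl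
          (fun pts j =>
            if pkDict.contains (PySem.List.pyGetD ws j "") then
              pts + pkDict.getD (PySem.List.pyGetD ws j "") 0
            else pts) points
      else points)
      = (fun points iw => points +
          (if iw.2 == kw then
            ((PySem.List.pyRange (max 0 (iw.1 - 2)) (min (ws.length : Int) (iw.1 + 3)) 1).map
              (fun j => pkW (PySem.List.pyGetD ws j ""))).sum
           else 0)) := by
    funext p iw
    by_cases h : iw.2 == kw
    · rw [if_pos h, if_pos h]
      have hin : (fun (pts : Int) (j : Int) =>
          if pkDict.contains (PySem.List.pyGetD ws j "") then
            pts + pkDict.getD (PySem.List.pyGetD ws j "") 0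
          else pts)
          = (fun pts j => pts + pkW (PySem.List.pyGetD ws j "")) := by
        funext pts j
        rw [pkW, PySem.Dict.contains_eq_isSome_get?, PySem.Dict.getD_eq_get?_getD]
        cases hg : pkDict.get? (PySem.List.pyGetD ws j "") <;> simp
      rw [hin, PySem.List.foldl_add]
    · rw [if_neg h, if_neg h]; ring
  rw [hstepA, PySem.List.foldl_add]
  have hstepB : (fun (points : Int) (jw : Int × String) =>
      match pkDict.get? jw.2 with
      | some w => points + w *
          (((PySem.List.enumerate ws 0).foldl
              (fun acc iw => if iw.2 == kw then acc ++ [iw.1] else acc) ([] : List Int)).countP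
            (fun i => (i - jw.1).natAbs ≤ 2) : Int)
      | none => points)
      = (fun points jw => points + pkW jw.2 *
          ((PySem.List.enumerate ws 0).countP
            (fun iw => decide ((iw.1 - jw.1).natAbs ≤ 2 ∧ iw.2 = kw)) : Int)) := by
    funext p jw
    rw [PySem.List.foldl_append_if, List.nil_append, List.countP_map, List.countP_filter]
    have hcount : List.countP (fun a : Int × String => decide ((a.1 - jw.1).natAbs ≤ 2) && a.2 == kw)
        (PySem.List.enumerate ws 0)
        = List.countP (fun iw : Int × String => decide ((iw.1 - jw.1).natAbs ≤ 2 ∧ iw.2 = kw))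
        (PySem.List.enumerate ws 0) := List.countP_congr (by intro x _; simp)
    cases hg : pkDict.get? jw.2 <;> simp [pkW, hg, hcount]
  rw [hstepB, PySem.List.foldl_add]
  simp only [zero_add]
  have hA2 : (PySem.List.enumerate ws 0).map
      (fun iw : Int × String => if iw.2 == kw then
        ((PySem.List.pyRange (max 0 (iw.1 - 2)) (min (ws.length : Int) (iw.1 + 3)) 1).map
          (fun j => pkW (PySem.List.pyGetD ws j ""))).sum else 0)
      = (PySem.List.enumerate ws 0).map
      (fun iw : Int × String => ((PySem.List.enumerate ws 0).map
        (fun jw : Int × String =>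
          if ((iw.1 - jw.1).natAbs ≤ 2 ∧ iw.2 = kw) then pkW jw.2 else 0)).sum) := by
    apply List.map_congr_left
    intro iw hiw
    obtain ⟨k, hk, rfl⟩ := (PySem.List.mem_enumerate_iff ws 0 iw).mp hiw
    rw [windowSum ws (0 + (k : Int)) (by omega) (by omega)]
    by_cases h : ws[k] = kw
    · simp [h]
    · simp [h]
  rw [hA2, sum_sum_comm]
  refine congrArg List.sum (List.map_congr_left ?_)
  intro jw _
  rw [sum_if_const (PySem.List.enumerate ws 0)
    (fun iw : Int × String => ((iw.1 - jw.1).natAbs ≤ 2 ∧ iw.2 = kw)) (pkW jw.2)]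

-- ===== VERDICT (by name: the statement is the Claim_ definition above) =====
theorem calculate_proximity_score_spec : Claim_equal_calculate_proximity_score := by
  intro text keyword _
  unfold Spec_calculate_proximity_score calculate_proximity_score calculate_proximity_score_alt
  exact core _ _
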